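-- pv_equiv track=rewrite | github.com/nOOne-is-hier/TIS | SWEA/22576.근의_공식/22576.근의_공식6.py | solve_quadratic_mod2k
-- ===== SOURCE A (Python) =====
-- def safe_mod(a, m):
--     if m == 0:
--         return -1
--     return a % m
--
-- def solve_quadratic_mod2k(a, b, c, k):
--     if k <= 0:
--         return -1
--     if k == 1:
--         return 0 if c % 2 == 0 else -1
--
--     if a % 2 == b % 2 == 0:
--         if c % 2 == 1:
--             return -1
--         x = solve_quadratic_mod2k(a // 2, b // 2, c // 2, k - 1)
--         return -1 if x == -1 else safe_mod(x * 2, 1 << k)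
--
--     if a % 2 == 0:
--         if b % 2 == 0:
--             return -1
--         inverse_b = pow(b, -1, 1 << k) if b != 0 else -1
--         if inverse_b == -1:
--             return -1
--         return safe_mod(-c * inverse_b, 1 << k)
--
--     x = 0
--     for i in range(k):
--         px = safe_mod(a * (x ** 2) + b * x + c, 1 << (i + 1))
--         if px == 0:
--             return x
--         if safe_mod(a * 2 * x + b, 2) == 1:
--             x = safe_mod(x + (1 << i), 1 << k)
--
--     return -1
-- ===== SOURCE B (Python) =====
-- def solve_quadratic_mod2k(a, b, c, k):
--     # Iterative version: strip common factors of 2 with a shift counter,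
--     # solve the reduced case once, then apply a single shift-and-mod.
--     aa, bb, cc, kk, shift = a, b, c, k, 0
--     while True:
--         if kk <= 0:
--             return -1
--         if kk == 1:
--             r = 0 if cc % 2 == 0 else -1
--             break
--         if aa % 2 == 0 and bb % 2 == 0:
--             if cc % 2 == 1:
--                 return -1
--             aa //= 2
--             bb //= 2
--             cc //= 2
--             kk -= 1
--             shift += 1
--             continue
--         if aa % 2 == 0:
--             # bb is odd here, hence invertible mod 2**kk
--             r = (-cc * pow(bb, -1, 1 << kk)) % (1 << kk)
--             break
--         r = _hensel_lift(aa, bb, cc, kk)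
--         break
--     if r == -1:
--         return -1
--     return (r << shift) % (1 << k)
--
-- def _hensel_lift(a, b, c, kk):
--     x = 0
--     for i in range(kk):
--         if (a * x * x + b * x + c) % (1 << (i + 1)) == 0:
--             return x
--         if (2 * a * x + b) % 2 == 1:
--             x = (x + (1 << i)) % (1 << kk)
--     return -1
-- ===== Notes on version B (the rewrite author's own statement) =====
-- stated objective: simpler
-- what changed: Replaces the recursive even/even descent (which doubles and reduces mod 2^k at every level and re-checks sentinels on the way back up) with an explicit loop that only counts a shift, then applies one final left-shift-and-mod to the solution of the reduced instance.
import Mathlib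
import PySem

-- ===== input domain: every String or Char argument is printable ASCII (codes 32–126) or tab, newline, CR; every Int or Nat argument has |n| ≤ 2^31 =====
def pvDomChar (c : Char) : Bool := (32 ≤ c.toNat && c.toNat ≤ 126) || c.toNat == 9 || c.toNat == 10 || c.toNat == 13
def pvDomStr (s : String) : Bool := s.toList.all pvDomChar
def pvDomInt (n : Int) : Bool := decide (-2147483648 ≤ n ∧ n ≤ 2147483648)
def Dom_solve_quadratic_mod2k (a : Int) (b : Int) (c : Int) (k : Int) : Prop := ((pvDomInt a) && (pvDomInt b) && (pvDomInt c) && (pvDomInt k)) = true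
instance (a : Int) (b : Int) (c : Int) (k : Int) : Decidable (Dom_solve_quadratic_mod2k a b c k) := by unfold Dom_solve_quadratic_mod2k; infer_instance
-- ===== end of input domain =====

-- B replaces A's recursive even/even descent by an explicit loop with a shift counter
-- and one final shift-and-mod; simpler decomposition, same results.


-- ===== PORT A =====
-- safe_mod
def pySafeMod (a m : Int) : Int := if m = 0 then -1 else PySem.Int.mod a m

-- pow(b, -1, m): modular inverse in [0, m) via the extended gcd; ported by hand
-- (PySem.Int.powMod takes a Nat exponent). Exact whenever gcd(b, m) = 1 and m > 0,
-- which holds at both call sites (b odd, m = 2^k with k ≥ 2).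
def pyInvMod (b m : Int) : Int :=
  PySem.Int.mod (Nat.gcdA (PySem.Int.mod b m).toNat m.toNat) m

-- the 'for i in range(k)' Hensel-lifting loop of A
def liftLoopA (a b c kk : Int) (x : Int) (i : Nat) : Nat → Int
  | 0 => -1
  | n+1 =>
    let px := pySafeMod (a * x ^ 2 + b * x + c) ((2:Int) ^ (i+1))
    if px = 0 then x
    else if pySafeMod (a * 2 * x + b) 2 = 1 then
      liftLoopA a b c kk (pySafeMod (x + (2:Int) ^ i) ((2:Int) ^ kk.toNat)) (i+1) n
    else liftLoopA a b c kk x (i+1) n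

def solve_quadratic_mod2k (a : Int) (b : Int) (c : Int) (k : Int) : Int :=
  if k ≤ 0 then -1
  else if k = 1 then (if PySem.Int.mod c 2 = 0 then 0 else -1)
  else if PySem.Int.mod a 2 = PySem.Int.mod b 2 ∧ PySem.Int.mod b 2 = 0 then
    (if PySem.Int.mod c 2 = 1 then -1
     else
       let x := solve_quadratic_mod2k (PySem.Int.floordiv a 2) (PySem.Int.floordiv b 2)
                  (PySem.Int.floordiv c 2) (k - 1)
       if x = -1 then -1 else pySafeMod (x * 2) ((2:Int) ^ k.toNat))
  else if PySem.Int.mod a 2 = 0 then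
    (if PySem.Int.mod b 2 = 0 then -1
     else
       let inverse_b := if b ≠ 0 then pyInvMod b ((2:Int) ^ k.toNat) else -1
       if inverse_b = -1 then -1 else pySafeMod (-c * inverse_b) ((2:Int) ^ k.toNat))
  else liftLoopA a b c k 0 0 k.toNat
termination_by k.toNat
decreasing_by omega

-- ===== PORT B =====
-- B's _hensel_lift loop
def liftLoopB (a b c kk : Int) (x : Int) (i : Nat) : Nat → Int
  | 0 => -1
  | n+1 =>
    if PySem.Int.mod (a * x * x + b * x + c) ((2:Int) ^ (i+1)) = 0 then x
    else if PySem.Int.mod (2 * a * x + b) 2 = 1 then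
      liftLoopB a b c kk (PySem.Int.mod (x + (2:Int) ^ i) ((2:Int) ^ kk.toNat)) (i+1) n
    else liftLoopB a b c kk x (i+1) n

-- B's while-loop: returns (r, shift); r = -1 encodes the early 'return -1' paths
def altLoop (aa bb cc kk : Int) (shift : Nat) : Int × Nat :=
  if kk ≤ 0 then (-1, shift)
  else if kk = 1 then ((if PySem.Int.mod cc 2 = 0 then 0 else -1), shift)
  else if PySem.Int.mod aa 2 = 0 ∧ PySem.Int.mod bb 2 = 0 then
    (if PySem.Int.mod cc 2 = 1 then (-1, shift)
     else altLoop (PySem.Int.floordiv aa 2) (PySem.Int.floordiv bb 2)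
            (PySem.Int.floordiv cc 2) (kk - 1) (shift + 1))
  else if PySem.Int.mod aa 2 = 0 then
    (PySem.Int.mod (-cc * pyInvMod bb ((2:Int) ^ kk.toNat)) ((2:Int) ^ kk.toNat), shift)
  else (liftLoopB aa bb cc kk 0 0 kk.toNat, shift)
termination_by kk.toNat
decreasing_by omega

def solve_quadratic_mod2k_alt (a : Int) (b : Int) (c : Int) (k : Int) : Int :=
  let rs := altLoop a b c k 0
  if rs.1 = -1 then -1
  else PySem.Int.mod (rs.1 * (2:Int) ^ rs.2) ((2:Int) ^ k.toNat)

-- ===== PRECONDITION & SPEC =====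
def Spec_solve_quadratic_mod2k (a : Int) (b : Int) (c : Int) (k : Int) (out : Int) : Prop := out = solve_quadratic_mod2k_alt a b c k
instance (a : Int) (b : Int) (c : Int) (k : Int) (out : Int) : Decidable (Spec_solve_quadratic_mod2k a b c k out) := by unfold Spec_solve_quadratic_mod2k; infer_instance

-- ===== CLAIM (what is proved, stated in full; the proofs are below) =====
def Claim_equal_solve_quadratic_mod2k : Prop := ∀ (a : Int) (b : Int) (c : Int) (k : Int), Dom_solve_quadratic_mod2k a b c k → Spec_solve_quadratic_mod2k a b c k (solve_quadratic_mod2k a b c k)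

-- ===== LEMMAS AND PROOFS =====

-- the two lifting loops compute the same values
lemma lift_eq : ∀ (n : Nat) (a b c kk x : Int) (i : Nat),
    liftLoopA a b c kk x i n = liftLoopB a b c kk x i n := by
  intro n
  induction n with
  | zero => intros; rfl
  | succ n ih =>
    intro a b c kk x i
    have h1 : ((2:Int) ^ (i+1)) ≠ 0 := by positivity
    have h2 : ((2:Int) ^ kk.toNat) ≠ 0 := by positivity
    have e1 : a * x ^ 2 + b * x + c = a * x * x + b * x + c := by ring
    have e2 : a * 2 * x + b = 2 * a * x + b := by ring
    simp only [liftLoopA, liftLoopB, pySafeMod, if_neg h1, if_neg h2,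
      if_neg (two_ne_zero (α := Int)), e1, e2]
    split_ifs <;> first | rfl | exact ih ..

-- range invariant for A's lifting loop
lemma lift_range : ∀ (n : Nat) (a b c kk x : Int) (i : Nat),
    0 ≤ x → x < (2:Int) ^ kk.toNat →
    liftLoopA a b c kk x i n = -1 ∨
      (0 ≤ liftLoopA a b c kk x i n ∧ liftLoopA a b c kk x i n < (2:Int) ^ kk.toNat) := by
  intro n
  induction n with
  | zero => intros; exact Or.inl rfl
  | succ n ih =>
    intro a b c kk x i hx0 hxlt
    have hm : (0:Int) < (2:Int) ^ kk.toNat := by positivity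
    simp only [liftLoopA]
    split_ifs
    · exact Or.inr ⟨hx0, hxlt⟩
    · have h0 := PySem.Int.mod_nonneg (a := x + (2:Int) ^ i) hm
      have hlt := PySem.Int.mod_lt (a := x + (2:Int) ^ i) hm
      simp only [pySafeMod, if_neg (ne_of_gt hm)]
      exact ih _ _ _ _ _ _ h0 hlt
    · exact ih _ _ _ _ _ _ hx0 hxlt

-- the main correspondence between A's recursion and B's loop
lemma main_corr : ∀ (m : Nat) (a b c k : Int) (s : Nat), k.toNat = m →
    ((altLoop a b c k s).1 = -1 ∧ solve_quadratic_mod2k a b c k = -1) ∨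
      (∃ r d, altLoop a b c k s = (r, s + d) ∧ 0 ≤ r ∧
        r * (2:Int) ^ d < (2:Int) ^ k.toNat ∧
        solve_quadratic_mod2k a b c k = r * (2:Int) ^ d) := by
  intro m
  induction m with
  | zero =>
    intro a b c k s hm
    have hk : k ≤ 0 := by omega
    rw [solve_quadratic_mod2k, altLoop]
    simp [hk]
  | succ m ih =>
    intro a b c k s hm
    have hk0 : ¬ k ≤ 0 := by omega
    have hpos : (0:Int) < (2:Int) ^ k.toNat := by positivity
    rw [solve_quadratic_mod2k, altLoop]
    simp only [if_neg hk0]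
    by_cases hk1 : k = 1
    · subst hk1
      rcases PySem.Int.mod_two_eq c with hc | hc
      · right
        exact ⟨0, 0, by rw [if_pos rfl, if_pos hc]; norm_num, le_refl 0, by norm_num,
          by rw [if_pos rfl, if_pos hc]; norm_num⟩
      · have hcne : ¬ PySem.Int.mod c 2 = 0 := by rw [hc]; norm_num
        left
        exact ⟨by rw [if_pos rfl, if_neg hcne], by rw [if_pos rfl, if_neg hcne]⟩
    · simp only [if_neg hk1]
      have hkk : k.toNat = (k - 1).toNat + 1 := by omega
      rcases PySem.Int.mod_two_eq a with ha | ha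
      · rcases PySem.Int.mod_two_eq b with hb | hb
        · -- a even, b even: the descent step
          have hcondA : PySem.Int.mod a 2 = PySem.Int.mod b 2 ∧ PySem.Int.mod b 2 = 0 :=
            ⟨by rw [ha, hb], hb⟩
          have hcondB : PySem.Int.mod a 2 = 0 ∧ PySem.Int.mod b 2 = 0 := ⟨ha, hb⟩
          simp only [if_pos hcondA, if_pos hcondB]
          rcases PySem.Int.mod_two_eq c with hc | hc
          · have hcne1 : ¬ PySem.Int.mod c 2 = 1 := by rw [hc]; norm_num
            simp only [if_neg hcne1]
            rcases ih (PySem.Int.floordiv a 2) (PySem.Int.floordiv b 2)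
                (PySem.Int.floordiv c 2) (k - 1) (s + 1) (by omega) with
              ⟨h1, h2⟩ | ⟨r, d, heq, hr0, hlt, hsol⟩
            · exact Or.inl ⟨h1, by rw [if_pos h2]⟩
            · right
              have hge : (0:Int) ≤ r * 2 ^ d := mul_nonneg hr0 (by positivity)
              have hb1 : (0:Int) ≤ r * 2 ^ d * 2 := by linarith
              have hb2 : r * (2:Int) ^ d * 2 < 2 ^ k.toNat := by
                have h2k : (2:Int) ^ k.toNat = 2 ^ (k - 1).toNat * 2 := by rw [hkk]; ring
                rw [h2k]; linarith
              refine ⟨r, d + 1, ?_, hr0, ?_, ?_⟩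
              · rw [heq]
                simp only [Prod.mk.injEq]
                exact ⟨trivial, by omega⟩
              · calc r * (2:Int) ^ (d + 1) = r * 2 ^ d * 2 := by ring
                  _ < 2 ^ k.toNat := hb2
              · rw [hsol, if_neg (by intro h; linarith)]
                simp only [pySafeMod, if_neg (ne_of_gt hpos)]
                rw [PySem.Int.mod_eq_emod_of_pos hpos, Int.emod_eq_of_lt hb1 hb2]
                ring
          · -- c odd: both return -1
            exact Or.inl ⟨by rw [if_pos hc], by rw [if_pos hc]⟩
        · -- a even, b odd: the linear case
          have hcondA : ¬ (PySem.Int.mod a 2 = PySem.Int.mod b 2 ∧ PySem.Int.mod b 2 = 0) := by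
            rw [ha, hb]; norm_num
          have hcondB : ¬ (PySem.Int.mod a 2 = 0 ∧ PySem.Int.mod b 2 = 0) := by
            rw [hb]; norm_num
          have hb2 : ¬ PySem.Int.mod b 2 = 0 := by rw [hb]; norm_num
          have hbne : b ≠ 0 := by
            intro h; rw [h] at hb; simp [PySem.Int.mod] at hb
          have hinv0 : (0:Int) ≤ pyInvMod b ((2:Int) ^ k.toNat) := by
            unfold pyInvMod; exact PySem.Int.mod_nonneg _ hpos
          have hinvne : pyInvMod b ((2:Int) ^ k.toNat) ≠ -1 := by omega
          simp only [if_neg hcondA, if_neg hcondB, if_pos ha, if_neg hb2,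
            if_pos hbne, if_neg hinvne, pySafeMod, if_neg (ne_of_gt hpos)]
          right
          refine ⟨PySem.Int.mod (-c * pyInvMod b ((2:Int) ^ k.toNat)) ((2:Int) ^ k.toNat),
            0, by simp, PySem.Int.mod_nonneg _ hpos, ?_, by ring⟩
          simpa using PySem.Int.mod_lt _ hpos
      · -- a odd: Hensel lifting
        have hcondA : ¬ (PySem.Int.mod a 2 = PySem.Int.mod b 2 ∧ PySem.Int.mod b 2 = 0) := by
          rcases PySem.Int.mod_two_eq b with hb | hb <;> rw [ha, hb] <;> norm_num
        have hcondB : ¬ (PySem.Int.mod a 2 = 0 ∧ PySem.Int.mod b 2 = 0) := by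
          rw [ha]; norm_num
        have ha2 : ¬ PySem.Int.mod a 2 = 0 := by rw [ha]; norm_num
        simp only [if_neg hcondA, if_neg hcondB, if_neg ha2]
        rcases lift_range k.toNat a b c k 0 0 (le_refl 0) hpos with hL | ⟨hL0, hLlt⟩
        · exact Or.inl ⟨by rw [← lift_eq]; exact hL, hL⟩
        · right
          refine ⟨liftLoopA a b c k 0 0 k.toNat, 0, ?_, hL0, by simpa, by ring⟩
          rw [lift_eq]
          simp

-- ===== VERDICT (by name: the statement is the Claim_ definition above) =====
theorem solve_quadratic_mod2k_spec : Claim_equal_solve_quadratic_mod2k := by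
  intro a b c k _
  unfold Spec_solve_quadratic_mod2k solve_quadratic_mod2k_alt
  rcases main_corr k.toNat a b c k 0 rfl with ⟨h1, h2⟩ | ⟨r, d, heq, hr0, hlt, hsol⟩
  · simp [h1, h2]
  · have hr : r ≠ -1 := by omega
    have hpos : (0:Int) < (2:Int) ^ k.toNat := by positivity
    rw [heq]
    simp only [hr]
    rw [PySem.Int.mod_eq_emod_of_pos hpos, Nat.zero_add,
      Int.emod_eq_of_lt (mul_nonneg hr0 (by positivity)) hlt, hsol]
    simp
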